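-- pv_equiv track=rewrite | github.com/Francesco-Carlucci/ComputationalIntelligence2022 | lab3/nimRL.py | checkMisere
-- ===== SOURCE A (Python) =====
-- def checkMisere(rows):
--     cnt = 0
--     nonOneRow = -1
--     for i, row in enumerate(rows):
--         if row >= 2:
--             cnt += 1
--             nonOneRow = i
--         if cnt == 2:
--             return -1
--     return nonOneRow
-- ===== SOURCE B (Python) =====
-- def checkMisere(rows):
--     first = next((i for i, r in enumerate(rows) if r >= 2), None)
--     if first is None:
--         return -1
--     j = next(i for i, r in enumerate(reversed(rows)) if r >= 2)
--     last = len(rows) - 1 - j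
--     return first if first == last else -1
-- ===== Notes on version B (the rewrite author's own statement) =====
-- stated objective: alternative
-- what changed: Replaces A's single counted pass (running counter, mutable last-index, mid-loop early exit) with a two-ended search: find the first qualifying index scanning from the left and the last qualifying index scanning from the right; the index is unique exactly when the two coincide, so return it then, else -1.
import Mathlib
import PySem

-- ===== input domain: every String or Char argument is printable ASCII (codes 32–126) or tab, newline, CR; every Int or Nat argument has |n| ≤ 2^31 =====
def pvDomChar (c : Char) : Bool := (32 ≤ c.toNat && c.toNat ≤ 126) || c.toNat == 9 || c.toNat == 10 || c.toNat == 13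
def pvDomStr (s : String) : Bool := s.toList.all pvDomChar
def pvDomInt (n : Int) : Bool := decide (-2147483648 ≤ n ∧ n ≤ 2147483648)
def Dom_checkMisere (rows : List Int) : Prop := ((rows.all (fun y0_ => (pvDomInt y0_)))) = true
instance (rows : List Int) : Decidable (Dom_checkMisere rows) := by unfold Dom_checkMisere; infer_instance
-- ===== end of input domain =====

-- B replaces A's single counted pass (counter + last-index + mid-loop early exit) with a
-- two-ended search: first qualifying index from the left, last from the right, equal ⇒ unique;
-- objective: alternative decomposition, same O(n) cost.


-- ===== PORT A =====
-- loop of A: state (i, cnt, nonOneRow); the `cnt == 2` test returns -1 mid-loop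
def checkMisereGo (rows : List Int) (i cnt nonOneRow : Int) : Int :=
  match rows with
  | [] => nonOneRow
  | row :: rest =>
    let cnt' := if row ≥ 2 then cnt + 1 else cnt
    let non' := if row ≥ 2 then i else nonOneRow
    if cnt' = 2 then -1 else checkMisereGo rest (i + 1) cnt' non'

def checkMisere (rows : List Int) : Int := checkMisereGo rows 0 0 (-1)

-- ===== PORT B =====
-- `next((i for i, r in enumerate(xs) if r >= 2), None)`: first index ≥ the start index i with row ≥ 2
def findFirstGe2 (rows : List Int) (i : Int) : Option Int :=
  match rows with
  | [] => none
  | r :: rest => if r ≥ 2 then some i else findFirstGe2 rest (i + 1)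

def checkMisere_alt (rows : List Int) : Int :=
  match findFirstGe2 rows 0 with
  | none => -1
  | some first =>
    match findFirstGe2 rows.reverse 0 with
    | none => -1   -- unreachable: a qualifying row exists
    | some j =>
      let last : Int := (rows.length : Int) - 1 - j
      if first = last then first else -1

-- ===== PRECONDITION & SPEC =====
def Spec_checkMisere (rows : List Int) (out : Int) : Prop := out = checkMisere_alt rows
instance (rows : List Int) (out : Int) : Decidable (Spec_checkMisere rows out) := by unfold Spec_checkMisere; infer_instance

-- ===== CLAIM (what is proved, stated in full; the proofs are below) =====
def Claim_equal_checkMisere : Prop := ∀ (rows : List Int), Dom_checkMisere rows → Spec_checkMisere rows (checkMisere rows)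

-- ===== LEMMAS AND PROOFS =====
-- proof-only helper: the list of indices (from start index i) whose row is ≥ 2
def collectGe2 (rows : List Int) (i : Int) : List Int :=
  match rows with
  | [] => []
  | r :: rest =>
    if r ≥ 2 then i :: collectGe2 rest (i + 1) else collectGe2 rest (i + 1)

-- A with cnt = 1 returns nonOneRow iff no further row ≥ 2, else -1
theorem checkMisereGo_one (rows : List Int) : ∀ (i non : Int),
    checkMisereGo rows i 1 non = (match collectGe2 rows i with | [] => non | _ => -1) := by
  induction rows with
  | nil => intro i non; rfl
  | cons row rest ih =>
    intro i non
    by_cases h : row ≥ 2 <;> simp [checkMisereGo, collectGe2, h, ih]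

-- characterisation of A: the sole collected index, or -1
theorem checkMisereGo_zero (rows : List Int) : ∀ (i : Int),
    checkMisereGo rows i 0 (-1) =
      (match collectGe2 rows i with | [x] => x | _ => -1) := by
  induction rows with
  | nil => intro i; rfl
  | cons row rest ih =>
    intro i
    by_cases h : row ≥ 2
    · simp only [checkMisereGo, collectGe2, h, if_pos]
      have := checkMisereGo_one rest (i + 1) i
      norm_num [this]
      cases collectGe2 rest (i + 1) <;> simp
    · simp [checkMisereGo, collectGe2, h, ih]

-- B's left search is the head of the collected list
theorem findFirstGe2_head (rows : List Int) : ∀ (i : Int),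
    findFirstGe2 rows i = (collectGe2 rows i).head? := by
  induction rows with
  | nil => intro i; rfl
  | cons r rest ih =>
    intro i
    by_cases h : r ≥ 2 <;> simp [findFirstGe2, collectGe2, h, ih]

theorem findFirstGe2_append (xs ys : List Int) : ∀ (i : Int),
    findFirstGe2 (xs ++ ys) i =
      (match findFirstGe2 xs i with
       | some j => some j
       | none => findFirstGe2 ys (i + xs.length)) := by
  induction xs with
  | nil => intro i; simp [findFirstGe2]
  | cons r rest ih =>
    intro i
    by_cases h : r ≥ 2
    · simp [findFirstGe2, h]
    · simp only [List.cons_append, findFirstGe2, h, ih]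
      have : i + 1 + (rest.length : Int) = i + (rest.length + 1 : Nat) := by push_cast [List.length_cons]; ring
      simp [this]

-- B's right search finds the last collected index
theorem findFirstGe2_reverse (rows : List Int) : ∀ (i : Int),
    (collectGe2 rows i).getLast? =
      (findFirstGe2 rows.reverse 0).map (fun j => i + (rows.length : Int) - 1 - j) := by
  induction rows with
  | nil => intro i; rfl
  | cons r rest ih =>
    intro i
    have hrev : (r :: rest).reverse = rest.reverse ++ [r] := by simp
    rw [hrev, findFirstGe2_append]
    by_cases h : r ≥ 2
    · simp only [collectGe2, h, if_pos]
      cases hf : findFirstGe2 rest.reverse 0 with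
      | none =>
        have := ih (i + 1)
        rw [hf] at this
        simp only [Option.map_none] at this
        rw [List.getLast?_cons, this]
        simp [findFirstGe2, h, List.length_reverse]
        ring
      | some j =>
        have := ih (i + 1)
        rw [hf] at this
        rw [List.getLast?_cons, this]
        simp only [Option.map_some, Option.getD_some]
        congr 1
        push_cast [List.length_cons]; ring
    · simp only [collectGe2, h, if_neg, not_false_iff]
      cases hf : findFirstGe2 rest.reverse 0 with
      | none =>
        have := ih (i + 1)
        rw [hf] at this
        simp [this, findFirstGe2, h]
      | some j =>
        have := ih (i + 1)
        rw [hf] at this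
        rw [this]
        simp only [Option.map_some]
        congr 2
        push_cast [List.length_cons]; ring

-- collected indices are ≥ the start index
theorem collectGe2_ge (rows : List Int) : ∀ (i x : Int), x ∈ collectGe2 rows i → i ≤ x := by
  induction rows with
  | nil => intro i x hx; simp [collectGe2] at hx
  | cons r rest ih =>
    intro i x hx
    by_cases h : r ≥ 2
    · simp only [collectGe2, h, if_pos, List.mem_cons] at hx
      rcases hx with rfl | hx
      · exact le_refl x
      · have := ih (i + 1) x hx; omega
    · simp only [collectGe2, h, if_neg, not_false_iff] at hx
      have := ih (i + 1) x hx; omega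


-- collected indices are strictly increasing
theorem collectGe2_pairwise (rows : List Int) : ∀ (i : Int),
    (collectGe2 rows i).Pairwise (· < ·) := by
  induction rows with
  | nil => intro i; simp [collectGe2]
  | cons r rest ih =>
    intro i
    by_cases h : r ≥ 2
    · simp only [collectGe2, h, if_pos, List.pairwise_cons]
      refine ⟨fun z hz => ?_, ih (i + 1)⟩
      have := collectGe2_ge rest (i + 1) z hz; omega
    · simp only [collectGe2, h, if_neg, not_false_iff]
      exact ih (i + 1)

-- ===== VERDICT (by name: the statement is the Claim_ definition above) =====
theorem checkMisere_spec : Claim_equal_checkMisere := by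
  intro rows _
  unfold Spec_checkMisere checkMisere checkMisere_alt
  rw [checkMisereGo_zero rows 0, findFirstGe2_head]
  have hlast := findFirstGe2_reverse rows 0
  cases hcl : collectGe2 rows 0 with
  | nil =>
    rw [hcl] at hlast
    simp only [List.getLast?_nil] at hlast
    cases hf : findFirstGe2 rows.reverse 0 <;> simp_all
  | cons x xs =>
    rw [hcl] at hlast
    cases hf : findFirstGe2 rows.reverse 0 with
    | none => rw [hf] at hlast; simp at hlast
    | some j =>
      rw [hf] at hlast
      simp only [Option.map_some] at hlast
      cases xs with
      | nil =>
        simp only [List.getLast?_singleton, Option.some_inj] at hlast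
        have hx : x = (rows.length : Int) - 1 - j := by omega
        simp [hx]
      | cons y ys =>
        -- two or more collected indices: head < last, so B returns -1 too
        have hpw := collectGe2_pairwise rows 0
        rw [hcl, List.pairwise_cons] at hpw
        obtain ⟨l', hl'⟩ := List.getLast?_eq_some_iff.mp hlast
        have hmemL : (0 + (rows.length : Int) - 1 - j) ∈ y :: ys := by
          cases l' with
          | nil => simp at hl'
          | cons a t =>
            rw [List.cons_append] at hl'
            have ht : y :: ys = t ++ [0 + (rows.length : Int) - 1 - j] := (List.cons.injEq _ _ _ _ ▸ hl').2
            rw [ht]; simp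
        have hx : x < 0 + (rows.length : Int) - 1 - j := hpw.1 _ hmemL
        have hne : x ≠ (rows.length : Int) - 1 - j := by omega
        simp [hne]
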